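-- pv_equiv track=rewrite | github.com/aircrack-ng/aircrack-ng | scripts/airdrop-ng/airdrop/libDumpParse.py | clientApChannelRelationship
-- ===== SOURCE A (Python) =====
-- def clientApChannelRelationship(data):
-- 	"""
-- 	parse the dic for the relationships of client to ap
-- 	"""
-- 	clients = data[0]
-- 	AP = data[1]
-- 	NA = [] #create a var to keep the not associated clients
-- 	NAP = [] #create a var to keep track of associated clients to AP's we can't see
-- 	apCount = {} #count number of Aps dict is faster the list stored as BSSID:number of essids
-- 	apClient = {} #dict that stores bssid and clients as a nested list
-- 	for key in (clients):
-- 		mac = clients[key] #mac is the MAC address of the client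
-- 		if mac["bssid"] != ' (notassociated) ': #one line of our dictionary of clients
-- 			if mac["bssid"] in AP: # if it is check to see it's an AP we can see and have info on
-- 				if mac["bssid"] in apClient:
-- 					apClient[mac["bssid"]].extend([key]) #if key exists append new client
-- 				else:
-- 					apClient[mac["bssid"]] = [key] #create new key and append the client
-- 			else: NAP.append(key) # stores the clients that are talking to an access point we can't see
-- 		else: NA.append(key) #stores the lines of the not associated AP's in a list
-- 	return apClient
-- ===== SOURCE B (Python) =====
-- def clientApChannelRelationship(data):
--     clients = data[0]
--     AP = data[1]
--     pairs = [(m["bssid"], k) for k, m in clients.items()]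
--     order = list(dict.fromkeys(
--         b for b, _ in pairs if b != ' (notassociated) ' and b in AP))
--     return {b: [k for b2, k in pairs if b2 == b] for b in order}
-- ===== Notes on version B (the rewrite author's own statement) =====
-- stated objective: alternative
-- what changed: Instead of A's single loop that grows the result dict with insert-or-extend branches (plus dead NA/NAP/apCount bookkeeping), B builds a (bssid,key) pair list, dedups the kept bssids in first-occurrence order, and emits one comprehension per distinct bssid collecting its clients.
import Mathlib
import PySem

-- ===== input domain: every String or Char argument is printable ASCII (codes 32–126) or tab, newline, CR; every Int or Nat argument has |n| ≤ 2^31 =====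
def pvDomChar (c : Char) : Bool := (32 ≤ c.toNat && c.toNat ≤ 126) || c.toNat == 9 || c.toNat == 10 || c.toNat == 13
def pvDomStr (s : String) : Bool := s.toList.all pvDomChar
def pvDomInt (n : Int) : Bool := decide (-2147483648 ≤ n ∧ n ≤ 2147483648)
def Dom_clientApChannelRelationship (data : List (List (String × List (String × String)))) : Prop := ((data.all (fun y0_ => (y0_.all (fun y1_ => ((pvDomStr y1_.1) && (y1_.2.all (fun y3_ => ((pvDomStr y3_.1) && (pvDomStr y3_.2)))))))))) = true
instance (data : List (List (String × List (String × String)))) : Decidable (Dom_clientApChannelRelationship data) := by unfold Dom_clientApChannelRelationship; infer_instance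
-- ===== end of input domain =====

-- ===== PORT A =====
-- B replaces A's incremental insert-or-extend dict loop by a pair list + ordered dedup of the
-- kept bssids + one per-bssid collection pass (alternative decomposition, same results; return-value
-- equivalence only -- A also builds unused local lists, never returned).
-- A's dict loop: iterate the client keys, skip not-associated and invisible APs,
-- and grow apClient by insert / in-place extend (NA/NAP/apCount are dead locals, dropped as values).
def clientApChannelRelationship (data : List (List (String × List (String × String)))) : List (String × List String) :=
  let clients : PySem.Dict String (List (String × String)) := PySem.Dict.ofList (PySem.List.pyGetD data 0 [])
  let AP : PySem.Dict String (List (String × String)) := PySem.Dict.ofList (PySem.List.pyGetD data 1 [])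
  let apClient : PySem.Dict String (List String) :=
    clients.keys.foldl (fun ap key =>
      let mac : PySem.Dict String String := PySem.Dict.ofList (clients.getD key [])
      if (mac.getD "bssid" "") ≠ " (notassociated) " then
        if AP.contains (mac.getD "bssid" "") then
          if ap.contains (mac.getD "bssid" "") then
            ap.modify (mac.getD "bssid" "") [] (fun l => l ++ [key])
          else
            ap.insert (mac.getD "bssid" "") [key]
        else ap
      else ap) PySem.Dict.empty
  apClient.items

-- ===== PORT B =====
-- B: one (bssid, key) pair list, the kept bssids deduped in first-occurrence order,
-- then one comprehension per distinct bssid collecting its clients.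
def clientApChannelRelationship_alt (data : List (List (String × List (String × String)))) : List (String × List String) :=
  let clients : PySem.Dict String (List (String × String)) := PySem.Dict.ofList (PySem.List.pyGetD data 0 [])
  let AP : PySem.Dict String (List (String × String)) := PySem.Dict.ofList (PySem.List.pyGetD data 1 [])
  let pairs : List (String × String) :=
    clients.items.map (fun p => ((PySem.Dict.ofList p.2).getD "bssid" "", p.1))
  let order : List String :=
    PySem.List.dedup ((pairs.filter (fun q => q.1 != " (notassociated) " && AP.contains q.1)).map (fun q => q.1))
  order.map (fun b => (b, (pairs.filter (fun q => q.1 == b)).map (fun q => q.2)))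

-- ===== PRECONDITION & SPEC =====
-- Pre_ excludes exactly the inputs where A raises: data[1] (IndexError) needs at least two
-- entries, and mac["bssid"] (KeyError) needs every client record (after dict key collapsing)
-- to carry a "bssid" field.
def Pre_clientApChannelRelationship (data : List (List (String × List (String × String)))) : Prop :=
  2 ≤ data.length ∧
  ∀ v ∈ (PySem.Dict.ofList (data.getD 0 [])).values, "bssid" ∈ v.map Prod.fst
instance (data : List (List (String × List (String × String)))) : Decidable (Pre_clientApChannelRelationship data) := by unfold Pre_clientApChannelRelationship; infer_instance
def pvWitness_clientApChannelRelationship : (List (List (String × List (String × String)))) :=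
  [[("c1", [("bssid", "ap1")]), ("c2", [("bssid", " (notassociated) ")]), ("c3", [("bssid", "ap1")])],
   [("ap1", [("essid", "net")])]]
def Spec_clientApChannelRelationship (data : List (List (String × List (String × String)))) (out : List (String × List String)) : Prop := out = clientApChannelRelationship_alt data
instance (data : List (List (String × List (String × String)))) (out : List (String × List String)) : Decidable (Spec_clientApChannelRelationship data out) := by unfold Spec_clientApChannelRelationship; infer_instance

-- ===== CLAIM (what is proved, stated in full; the proofs are below) =====
def Claim_equal_clientApChannelRelationship : Prop := ∀ (data : List (List (String × List (String × String)))), Dom_clientApChannelRelationship data → Pre_clientApChannelRelationship data → Spec_clientApChannelRelationship data (clientApChannelRelationship data)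

-- ===== LEMMAS AND PROOFS =====

-- A's insert-or-extend branch is exactly Dict.modify with default [].
lemma modify_of_not_contains_append (d : PySem.Dict String (List String)) (b k : String)
    (h : d.contains b = false) :
    d.modify b [] (fun l => l ++ [k]) = d.insert b [k] := by
  simp [PySem.Dict.modify, PySem.Dict.getD_of_not_contains d ([] : List String) h]

-- Characterisation of the grouping fold: its items are the deduped keys paired with their groups.
lemma group_items (pairs : List (String × String)) (keep : String → Bool) :
    (pairs.foldl (fun ap p => if keep p.1 then ap.modify p.1 [] (fun l => l ++ [p.2]) else ap)
        (PySem.Dict.empty : PySem.Dict String (List String))).items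
    = (PySem.List.dedup ((pairs.filter (fun q => keep q.1)).map (fun q => q.1))).map
        (fun b => (b, ((pairs.filter (fun q => keep q.1)).filter (fun q => q.1 == b)).map (fun q => q.2))) := by
  have hfold :
      pairs.foldl (fun ap p => if keep p.1 then ap.modify p.1 [] (fun l => l ++ [p.2]) else ap)
        (PySem.Dict.empty : PySem.Dict String (List String))
      = (pairs.filter (fun q => keep q.1)).foldl
          (fun d p => d.modify p.1 [] (fun l => l ++ [p.2])) PySem.Dict.empty := by
    rw [List.foldl_filter]
  rw [hfold]
  have hnd : ((pairs.filter (fun q => keep q.1)).foldl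
      (fun d p => d.modify p.1 [] (fun l => l ++ [p.2])) (PySem.Dict.empty : PySem.Dict String (List String))).keys.Nodup := by
    exact PySem.Dict.nodup_keys_foldl_modify_key _ _ _ _ _ (by simp [PySem.Dict.keys_empty])
  rw [PySem.Dict.items_eq_map_keys _ hnd []]
  have hkeys : ((pairs.filter (fun q => keep q.1)).foldl
      (fun d p => d.modify p.1 [] (fun l => l ++ [p.2])) (PySem.Dict.empty : PySem.Dict String (List String))).keys
      = PySem.List.dedup ((pairs.filter (fun q => keep q.1)).map (fun q => q.1)) := by
    rw [PySem.Dict.keys_foldl_modify_key (List.filter (fun q => keep q.1) pairs) (fun (q : String × String) => q.1)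
        ([] : List String) (fun _ p => (fun l => l ++ [p.2]))]
    simp [PySem.Dict.keys_empty, PySem.Set.update_nil_left]
  rw [hkeys]
  apply List.map_congr_left
  intro b _
  rw [PySem.Dict.getD_foldl_modify_append]
  simp [PySem.Dict.getD_empty]

-- The two ports, after peeling the shared data[0]/data[1] extraction.
lemma main_aux (clients AP : PySem.Dict String (List (String × String))) (hnd : clients.keys.Nodup) :
    (clients.keys.foldl (fun ap key =>
        let mac : PySem.Dict String String := PySem.Dict.ofList (clients.getD key [])
        if (mac.getD "bssid" "") ≠ " (notassociated) " then
          if AP.contains (mac.getD "bssid" "") then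
            if ap.contains (mac.getD "bssid" "") then ap.modify (mac.getD "bssid" "") [] (fun l => l ++ [key])
            else ap.insert (mac.getD "bssid" "") [key]
          else ap
        else ap) (PySem.Dict.empty : PySem.Dict String (List String))).items
    = (PySem.List.dedup (((clients.items.map (fun p => ((PySem.Dict.ofList p.2).getD "bssid" "", p.1))).filter
          (fun q => q.1 != " (notassociated) " && AP.contains q.1)).map (fun q => q.1))).map
        (fun b => (b, ((clients.items.map (fun p => ((PySem.Dict.ofList p.2).getD "bssid" "", p.1))).filter
          (fun q => q.1 == b)).map (fun q => q.2))) := by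
  have hpairs : clients.items.map (fun p => ((PySem.Dict.ofList p.2).getD "bssid" "", p.1))
      = clients.keys.map (fun k => ((PySem.Dict.ofList (clients.getD k [])).getD "bssid" "", k)) := by
    rw [PySem.Dict.items_eq_map_keys clients hnd []]
    simp [List.map_map, Function.comp]
  rw [hpairs]
  have hfold : (clients.keys.foldl (fun ap key =>
        let mac : PySem.Dict String String := PySem.Dict.ofList (clients.getD key [])
        if (mac.getD "bssid" "") ≠ " (notassociated) " then
          if AP.contains (mac.getD "bssid" "") then
            if ap.contains (mac.getD "bssid" "") then ap.modify (mac.getD "bssid" "") [] (fun l => l ++ [key])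
            else ap.insert (mac.getD "bssid" "") [key]
          else ap
        else ap) (PySem.Dict.empty : PySem.Dict String (List String)))
      = ((clients.keys.map (fun k => ((PySem.Dict.ofList (clients.getD k [])).getD "bssid" "", k))).foldl
          (fun ap q => if q.1 != " (notassociated) " && AP.contains q.1
                       then ap.modify q.1 [] (fun l => l ++ [q.2]) else ap)
          (PySem.Dict.empty : PySem.Dict String (List String))) := by
    rw [List.foldl_map]
    have hfun : (fun (ap : PySem.Dict String (List String)) (key : String) =>
        let mac : PySem.Dict String String := PySem.Dict.ofList (clients.getD key [])
        if (mac.getD "bssid" "") ≠ " (notassociated) " then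
          if AP.contains (mac.getD "bssid" "") then
            if ap.contains (mac.getD "bssid" "") then ap.modify (mac.getD "bssid" "") [] (fun l => l ++ [key])
            else ap.insert (mac.getD "bssid" "") [key]
          else ap
        else ap)
      = (fun (x : PySem.Dict String (List String)) (y : String) =>
          if (((PySem.Dict.ofList (clients.getD y [])).getD "bssid" "", y).1 != " (notassociated) " &&
              AP.contains ((PySem.Dict.ofList (clients.getD y [])).getD "bssid" "", y).1)
          then x.modify ((PySem.Dict.ofList (clients.getD y [])).getD "bssid" "", y).1 []
                 (fun l => l ++ [((PySem.Dict.ofList (clients.getD y [])).getD "bssid" "", y).2])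
          else x) := by
      funext ap key
      simp only []
      by_cases h1 : (PySem.Dict.ofList (clients.getD key [])).getD "bssid" "" = " (notassociated) "
      · simp [h1]
      · by_cases h2 : AP.contains ((PySem.Dict.ofList (clients.getD key [])).getD "bssid" "")
        · by_cases h3 : ap.contains ((PySem.Dict.ofList (clients.getD key [])).getD "bssid" "")
          · simp [h1, h2, h3]
          · simp [h1, h2, h3,
              modify_of_not_contains_append ap ((PySem.Dict.ofList (clients.getD key [])).getD "bssid" "") key
                (by simpa using h3)]
        · simp [h1, h2]
    rw [hfun]
  rw [hfold]
  rw [group_items (clients.keys.map (fun k => ((PySem.Dict.ofList (clients.getD k [])).getD "bssid" "", k)))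
      (fun b => b != " (notassociated) " && AP.contains b)]
  apply List.map_congr_left
  intro b hb
  have hkeep : (b != " (notassociated) " && AP.contains b) = true := by
    have hb' : b ∈ ((clients.keys.map (fun k => ((PySem.Dict.ofList (clients.getD k [])).getD "bssid" "", k))).filter
        (fun q => q.1 != " (notassociated) " && AP.contains q.1)).map (fun q => q.1) := by
      simpa [PySem.List.dedup_eq_ofList, PySem.Set.mem_ofList] using hb
    obtain ⟨q, hq, rfl⟩ := List.mem_map.mp hb'
    exact (List.mem_filter.mp hq).2
  refine congrArg (fun l => (b, l)) ?_
  apply congrArg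
  rw [List.filter_filter]
  apply List.filter_congr
  intro x _
  by_cases hx : x.1 = b
  · simp [hx, hkeep]
  · simp [hx]

-- ===== VERDICT (by name: the statement is the Claim_ definition above) =====
theorem clientApChannelRelationship_spec : Claim_equal_clientApChannelRelationship := by
  intro data _ _
  unfold Spec_clientApChannelRelationship clientApChannelRelationship clientApChannelRelationship_alt
  exact main_aux _ _ (PySem.Dict.nodup_keys_ofList _)
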